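-- pv_equiv track=rewrite | github.com/Nevermore233/ZIPcnv | zip_caller.py | find_continuous_up_segments
-- ===== SOURCE A (Python) =====
-- def find_continuous_up_segments(ct, H_pos, min_length):
--     up_segments = []
--     current_segment = []
--
--     for i, num in enumerate(ct):
--         if num >= H_pos:
--             current_segment.append((i, num))
--         else:
--             if len(current_segment) >= min_length:
--                 up_segments.append(current_segment)
--             current_segment = []
--
--     if len(current_segment) >= min_length:
--         up_segments.append(current_segment)
--
--     return up_segments
-- ===== SOURCE B (Python) =====
-- def find_continuous_up_segments(ct, H_pos, min_length):
--     # split-on-delimiter strategy: scan to the end k of the run of >= H_pos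
--     # elements starting at i, emit the slice when long enough, skip the
--     # delimiter, repeat; the final (possibly empty) piece is just the last run.
--     pairs = list(enumerate(ct))
--     n = len(pairs)
--     res = []
--     i = 0
--     while True:
--         k = i
--         while k < n and pairs[k][1] >= H_pos:
--             k += 1
--         if k - i >= min_length:
--             res.append(pairs[i:k])
--         if k == n:
--             return res
--         i = k + 1
-- ===== Notes on version B (the rewrite author's own statement) =====
-- stated objective: alternative
-- what changed: Replaces A's single-pass state machine (a current_segment accumulator flushed on each below-threshold element and once at the end) by a split-on-delimiter scan: an index loop that finds the end k of the run starting at i, emits the slice pairs[i:k] when long enough, and jumps past the delimiter to k+1.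
import Mathlib
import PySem

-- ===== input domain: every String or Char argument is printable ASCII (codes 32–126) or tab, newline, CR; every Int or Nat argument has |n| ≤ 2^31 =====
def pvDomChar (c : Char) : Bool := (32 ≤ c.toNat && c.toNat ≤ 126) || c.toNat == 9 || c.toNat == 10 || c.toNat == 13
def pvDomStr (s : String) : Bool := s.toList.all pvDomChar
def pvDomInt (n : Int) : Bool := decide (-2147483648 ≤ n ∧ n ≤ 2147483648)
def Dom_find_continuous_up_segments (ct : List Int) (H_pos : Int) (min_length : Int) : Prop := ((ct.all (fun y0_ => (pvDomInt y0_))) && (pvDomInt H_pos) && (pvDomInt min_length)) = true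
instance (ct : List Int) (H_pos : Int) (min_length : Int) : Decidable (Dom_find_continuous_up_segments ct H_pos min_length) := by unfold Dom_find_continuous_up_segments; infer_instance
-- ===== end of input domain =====

-- B replaces A's flush-on-delimiter state machine by a split-on-delimiter index scan (alternative decomposition, same cost).

-- ===== PORT A =====
-- the body of A's for-loop: append to current_segment, or flush it and reset
def fcusStep (H_pos min_length : Int) (st : List (List (Int × Int)) × List (Int × Int)) (p : Int × Int) : List (List (Int × Int)) × List (Int × Int) :=
  if H_pos ≤ p.2 then (st.1, st.2 ++ [p])
  else ((if min_length ≤ (st.2.length : Int) then st.1 ++ [st.2] else st.1), [])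

def find_continuous_up_segments (ct : List Int) (H_pos : Int) (min_length : Int) : List (List (Int × Int)) :=
  let fin := (PySem.List.enumerate ct).foldl (fcusStep H_pos min_length) ([], [])
  fin.1 ++ (if min_length ≤ (fin.2.length : Int) then [fin.2] else [])

-- ===== PORT B =====
-- B's inner while loop: the position k ≥ i of the first element below H_pos (or len)
def fcusScan (H_pos : Int) (pairs : List (Int × Int)) (k : Nat) : Nat :=
  if h : k < pairs.length then
    if H_pos ≤ (pairs[k]'h).2 then fcusScan H_pos pairs (k + 1) else k
  else k
termination_by pairs.length - k

-- termination fact for the outer loop, cited in its decreasing_by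
theorem fcusScan_le_self (H_pos : Int) (pairs : List (Int × Int)) (k : Nat) :
    k ≤ fcusScan H_pos pairs k := by
  induction k using fcusScan.induct H_pos pairs with
  | case1 k h hp ih => rw [fcusScan]; simp [h, hp]; omega
  | case2 k h hp => rw [fcusScan]; simp [h, hp]
  | case3 k h => rw [fcusScan]; simp [h]

-- B's outer while loop (res is built by the concatenation; i is the loop index).
-- Python tests `k == n`; since i ≤ k ≤ n on every reachable state this dite is exact.
def fcusLoop (H_pos min_length : Int) (pairs : List (Int × Int)) (i : Nat) : List (List (Int × Int)) :=
  let k := fcusScan H_pos pairs i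
  (if min_length ≤ ((k - i : Nat) : Int) then [(pairs.drop i).take (k - i)] else []) ++
    (if h : pairs.length ≤ k then [] else fcusLoop H_pos min_length pairs (k + 1))
termination_by pairs.length - i
decreasing_by
  have := fcusScan_le_self H_pos pairs i
  omega

def find_continuous_up_segments_alt (ct : List Int) (H_pos : Int) (min_length : Int) : List (List (Int × Int)) :=
  fcusLoop H_pos min_length (PySem.List.enumerate ct) 0

-- ===== PRECONDITION & SPEC =====
def Spec_find_continuous_up_segments (ct : List Int) (H_pos : Int) (min_length : Int) (out : List (List (Int × Int))) : Prop := out = find_continuous_up_segments_alt ct H_pos min_length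
instance (ct : List Int) (H_pos : Int) (min_length : Int) (out : List (List (Int × Int))) : Decidable (Spec_find_continuous_up_segments ct H_pos min_length out) := by unfold Spec_find_continuous_up_segments; infer_instance

-- ===== CLAIM (what is proved, stated in full; the proofs are below) =====
def Claim_equal_find_continuous_up_segments : Prop := ∀ (ct : List Int) (H_pos : Int) (min_length : Int), Dom_find_continuous_up_segments ct H_pos min_length → Spec_find_continuous_up_segments ct H_pos min_length (find_continuous_up_segments ct H_pos min_length)

-- ===== LEMMAS AND PROOFS =====

-- the run predicate, as a Bool
def fcusP (H_pos : Int) (q : Int × Int) : Bool := decide (H_pos ≤ q.2)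

-- proof-side list-shaped reformulation of B's loop
def fcusLoopL (H_pos min_length : Int) (l : List (Int × Int)) : List (List (Int × Int)) :=
  (if min_length ≤ ((l.takeWhile (fcusP H_pos)).length : Int) then [l.takeWhile (fcusP H_pos)] else []) ++
    (if h : l.dropWhile (fcusP H_pos) = [] then []
     else fcusLoopL H_pos min_length ((l.dropWhile (fcusP H_pos)).tail))
termination_by l.length
decreasing_by
  have h1 : (l.dropWhile (fcusP H_pos)).length ≤ l.length := List.length_dropWhile_le _ _
  have h3 : 0 < (l.dropWhile (fcusP H_pos)).length := List.length_pos_of_ne_nil h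
  simp [List.length_tail]; omega

theorem fcusScan_eq (H_pos : Int) (pairs : List (Int × Int)) (i : Nat) :
    fcusScan H_pos pairs i = i + ((pairs.drop i).takeWhile (fcusP H_pos)).length := by
  induction i using fcusScan.induct H_pos pairs with
  | case1 k h hp ih =>
      rw [fcusScan]; simp only [h, hp, dif_pos, if_pos]
      rw [List.drop_eq_getElem_cons h, List.takeWhile_cons]
      simp [fcusP, hp, ih]; omega
  | case2 k h hp =>
      rw [fcusScan]; simp only [h, hp, dif_pos]
      rw [List.drop_eq_getElem_cons h, List.takeWhile_cons]
      simp [fcusP, hp]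
  | case3 k h =>
      rw [fcusScan]; simp only [h]
      rw [List.drop_eq_nil_of_le (by omega)]; simp

-- l.take/drop at the takeWhile boundary
theorem fcus_take_tw (l : List (Int × Int)) (p : Int × Int → Bool) :
    l.take (l.takeWhile p).length = l.takeWhile p := by
  conv_lhs => rw [← List.takeWhile_append_dropWhile (p := p) (l := l)]
  rw [List.take_append]; simp

theorem fcus_drop_tw (l : List (Int × Int)) (p : Int × Int → Bool) :
    l.drop (l.takeWhile p).length = l.dropWhile p := by
  conv_lhs => rw [← List.takeWhile_append_dropWhile (p := p) (l := l)]
  rw [List.drop_append]; simp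

theorem fcus_len_split (l : List (Int × Int)) (p : Int × Int → Bool) :
    (l.takeWhile p).length + (l.dropWhile p).length = l.length := by
  conv_rhs => rw [← List.takeWhile_append_dropWhile (p := p) (l := l)]
  rw [List.length_append]

theorem fcusLoop_eq_loopL (H_pos min_length : Int) (pairs : List (Int × Int)) (i : Nat) :
    fcusLoop H_pos min_length pairs i = fcusLoopL H_pos min_length (pairs.drop i) := by
  induction i using fcusLoop.induct H_pos pairs with
  | _ i k ih =>
    rw [fcusLoop]
    conv_rhs => rw [fcusLoopL]
    have hscan := fcusScan_eq H_pos pairs i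
    have hlen := fcus_len_split (pairs.drop i) (fcusP H_pos)
    have hdlen : (pairs.drop i).length = pairs.length - i := by simp
    have hki : fcusScan H_pos pairs i - i = ((pairs.drop i).takeWhile (fcusP H_pos)).length := by
      omega
    have hseg : (pairs.drop i).take (fcusScan H_pos pairs i - i) = (pairs.drop i).takeWhile (fcusP H_pos) := by
      rw [hki]; exact fcus_take_tw _ _
    have hguard : pairs.length ≤ fcusScan H_pos pairs i ↔ (pairs.drop i).dropWhile (fcusP H_pos) = [] := by
      rw [← List.length_eq_zero_iff]; omega
    rw [hseg, hki]
    by_cases hstop : (pairs.drop i).dropWhile (fcusP H_pos) = []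
    · rw [dif_pos (hguard.mpr hstop), dif_pos hstop]
    · rw [dif_neg (fun h => hstop (hguard.mp h)), dif_neg hstop]
      rw [ih (fun h => hstop (hguard.mp h))]
      congr 1
      rw [← fcus_drop_tw (pairs.drop i) (fcusP H_pos), List.drop_drop, List.tail_drop]
      have hk : k = i + (List.takeWhile (fcusP H_pos) (List.drop i pairs)).length := hscan
      rw [hk]

-- state-shift: the foldl's first component is an accumulator
theorem fcus_foldl_shift (H_pos min_length : Int) (l : List (Int × Int)) :
    ∀ (segs : List (List (Int × Int))) (cur : List (Int × Int)),
      l.foldl (fcusStep H_pos min_length) (segs, cur) =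
        (segs ++ (l.foldl (fcusStep H_pos min_length) ([], cur)).1,
         (l.foldl (fcusStep H_pos min_length) ([], cur)).2) := by
  induction l with
  | nil => intro segs cur; simp
  | cons p t ih =>
    intro segs cur
    by_cases hp : H_pos ≤ p.2
    · simp only [List.foldl_cons, fcusStep, hp, if_pos]
      exact ih segs (cur ++ [p])
    · simp only [List.foldl_cons, fcusStep, hp, if_false]
      by_cases hm : min_length ≤ (cur.length : Int)
      · simp only [hm, if_pos]
        rw [ih (segs ++ [cur]) [], ih ([] ++ [cur]) []]
        simp
      · simp only [hm, if_false]
        simpa using ih segs []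

theorem fcus_main (H_pos min_length : Int) (l : List (Int × Int)) :
    ∀ cur : List (Int × Int),
      (l.foldl (fcusStep H_pos min_length) ([], cur)).1 ++
        (if min_length ≤ (((l.foldl (fcusStep H_pos min_length) ([], cur)).2).length : Int)
          then [(l.foldl (fcusStep H_pos min_length) ([], cur)).2] else []) =
      (if min_length ≤ ((cur ++ l.takeWhile (fcusP H_pos)).length : Int)
        then [cur ++ l.takeWhile (fcusP H_pos)] else []) ++
        (if h : l.dropWhile (fcusP H_pos) = [] then []
         else fcusLoopL H_pos min_length ((l.dropWhile (fcusP H_pos)).tail)) := by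
  induction l with
  | nil => intro cur; simp
  | cons p t ih =>
    intro cur
    by_cases hp : H_pos ≤ p.2
    · have hpb : fcusP H_pos p = true := by simp [fcusP, hp]
      simp only [List.foldl_cons, fcusStep, hp, if_pos,
        List.takeWhile_cons_of_pos hpb, List.dropWhile_cons_of_pos hpb]
      have := ih (cur ++ [p])
      simpa [List.append_assoc] using this
    · have hpb : ¬ fcusP H_pos p = true := by simp [fcusP, hp]
      simp only [List.foldl_cons, fcusStep, hp, if_false,
        List.takeWhile_cons_of_neg hpb, List.dropWhile_cons_of_neg hpb]
      have hsh := fcus_foldl_shift H_pos min_length t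
        (if min_length ≤ (cur.length : Int) then [] ++ [cur] else []) []
      rw [hsh]
      have hloop : fcusLoopL H_pos min_length t =
          (if min_length ≤ ((t.takeWhile (fcusP H_pos)).length : Int) then [t.takeWhile (fcusP H_pos)] else []) ++
            (if h : t.dropWhile (fcusP H_pos) = [] then []
             else fcusLoopL H_pos min_length ((t.dropWhile (fcusP H_pos)).tail)) := by
        conv_lhs => rw [fcusLoopL]
      have hmain := ih []
      simp only [List.nil_append] at hmain
      simp only [List.append_assoc, List.tail_cons, dif_neg (List.cons_ne_nil p t)]
      rw [hmain, ← hloop]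
      by_cases hm : min_length ≤ (cur.length : Int) <;> simp [hm]

-- ===== VERDICT (by name: the statement is the Claim_ definition above) =====
theorem find_continuous_up_segments_spec : Claim_equal_find_continuous_up_segments := by
  intro ct H_pos min_length _
  unfold Spec_find_continuous_up_segments
  unfold find_continuous_up_segments find_continuous_up_segments_alt
  rw [fcusLoop_eq_loopL]; simp only [List.drop_zero]
  rw [fcusLoopL]
  have := fcus_main H_pos min_length (PySem.List.enumerate ct) []
  simpa using this
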